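-- pv_equiv track=rewrite | github.com/jigold/hail | hail/python/hailtop/utils/os.py | contains_wildcard
-- ===== SOURCE A (Python) =====
-- wildcards = ('*', '?', '[', ']', '{', '}')
--
-- def contains_wildcard(c):
--     i = 0
--     n = len(c)
--     while i < n:
--         if i < n - 1 and c[i] == '\\' and c[i + 1] in wildcards:
--             i += 2
--             continue
--         elif c[i] in wildcards:
--             return True
--         i += 1
--     return False
-- ===== SOURCE B (Python) =====
-- def contains_wildcard(c):
--     prev = ''
--     for ch in c:
--         if ch in '*?[]{}' and prev != '\\':
--             return True
--         prev = ch
--     return False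
-- ===== Notes on version B (the rewrite author's own statement) =====
-- stated objective: simpler
-- what changed: Replaced A's index-stepping while loop with two-character lookahead and pair consumption (i += 2 on an escape) by a plain single pass over the characters that only remembers the previous character: a wildcard counts unless the previous character is a backslash (correct because a backslash is never itself a wildcard, so it can never be consumed as the escaped half of a pair); iterating characters directly also avoids per-index subscripting, a constant-factor speedup.
import Mathlib
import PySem

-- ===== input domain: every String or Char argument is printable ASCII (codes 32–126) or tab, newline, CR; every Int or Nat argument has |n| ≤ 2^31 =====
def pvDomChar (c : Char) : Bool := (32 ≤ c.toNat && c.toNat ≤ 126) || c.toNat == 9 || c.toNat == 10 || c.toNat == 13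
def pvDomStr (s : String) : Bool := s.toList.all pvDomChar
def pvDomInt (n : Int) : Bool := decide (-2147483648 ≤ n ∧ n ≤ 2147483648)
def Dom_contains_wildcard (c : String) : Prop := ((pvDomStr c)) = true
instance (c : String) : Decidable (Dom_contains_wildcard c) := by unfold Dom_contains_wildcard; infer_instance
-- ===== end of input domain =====

-- B replaces A's index-stepping lookahead loop (consuming '\W' pairs) with a single pass that tracks only the previous character (simpler; same O(n) cost).


-- ===== PORT A =====
-- 'x in wildcards' for A's tuple of the six wildcard characters
def pvIsWild (ch : Char) : Bool :=
  ch = '*' || ch = '?' || ch = '[' || ch = ']' || ch = '{' || ch = '}'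

-- A's while loop: position i carried as the remaining suffix; 'i < n - 1' ↔ at least two chars remain
def pvLoopA : List Char → Bool
  | [] => false
  | [a] => if pvIsWild a then true else false
  | a :: b :: rest =>
      if a = '\\' && pvIsWild b then pvLoopA rest
      else if pvIsWild a then true
      else pvLoopA (b :: rest)

def contains_wildcard (c : String) : Bool := pvLoopA c.toList

-- ===== PORT B =====
-- B's for loop: prev holds the previously seen character ('' before the first);
-- 'ch in '*?[]{}'' is membership of ch among that string's characters
def pvLoopB : String → List Char → Bool
  | _, [] => false
  | prev, ch :: rest =>
      if "*?[]{}".toList.contains ch && prev ≠ "\\" then true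
      else pvLoopB (String.ofList [ch]) rest

def contains_wildcard_alt (c : String) : Bool := pvLoopB "" c.toList

-- ===== PRECONDITION & SPEC =====
def Spec_contains_wildcard (c : String) (out : Bool) : Prop := out = contains_wildcard_alt c
instance (c : String) (out : Bool) : Decidable (Spec_contains_wildcard c out) := by unfold Spec_contains_wildcard; infer_instance

-- ===== CLAIM (what is proved, stated in full; the proofs are below) =====
def Claim_equal_contains_wildcard : Prop := ∀ (c : String), Dom_contains_wildcard c → Spec_contains_wildcard c (contains_wildcard c)

-- ===== LEMMAS AND PROOFS =====
theorem pvWildB_eq (ch : Char) : "*?[]{}".toList.contains ch = pvIsWild ch := by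
  have h : "*?[]{}".toList = ['*','?','[',']','{','}'] := by decide
  rw [h]
  apply Bool.eq_iff_iff.mpr
  simp only [List.contains_cons, List.contains_nil, pvIsWild, Bool.or_false,
    Bool.or_eq_true, beq_iff_eq, decide_eq_true_eq]
  tauto

theorem pvOfList_eq_backslash (a : Char) : (String.ofList [a] = "\\") ↔ a = '\\' := by
  have hb : ("\\" : String) = String.ofList ['\\'] := rfl
  rw [hb]
  constructor
  · intro h
    have h2 : [a] = ['\\'] := by
      have := congrArg String.toList h
      simpa [String.toList_ofList] using this
    exact (List.cons_eq_cons.mp h2).1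
  · intro h; rw [h]

theorem pvWild_not_backslash (a : Char) (h : pvIsWild a = true) : a ≠ '\\' := by
  intro he; subst he; simp [pvIsWild] at h

theorem pvLoopB_cons (p : String) (ch : Char) (rest : List Char) :
    pvLoopB p (ch :: rest) =
      if pvIsWild ch && p ≠ "\\" then true else pvLoopB (String.ofList [ch]) rest := by
  rw [pvLoopB, pvWildB_eq]

-- invariant: whenever B's prev is "\\", A has just consumed an escape pair, so the head is not wild
theorem loopA_eq_loopB : ∀ (l : List Char) (p : String),
    (p = "\\" → ∀ x xs, l = x :: xs → pvIsWild x = false) →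
    pvLoopA l = pvLoopB p l
  | [], _, _ => rfl
  | [a], p, H => by
      by_cases hw : pvIsWild a = true
      · have hp : p ≠ "\\" := fun hpe => by simpa [hw] using H hpe a [] rfl
        simp [pvLoopA, pvLoopB_cons, hw, hp]
      · have hw' : pvIsWild a = false := by simpa using hw
        rw [pvLoopB_cons]
        simp [pvLoopA, pvLoopB, hw']
  | a :: b :: rest, p, H => by
      by_cases hpair : (a = '\\' && pvIsWild b) = true
      · obtain ⟨ha, hb⟩ := by simpa [Bool.and_eq_true] using hpair
        have haw : pvIsWild a = false := by subst ha; simp [pvIsWild]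
        have hrec : pvLoopA rest = pvLoopB (String.ofList [b]) rest := by
          apply loopA_eq_loopB
          intro hpe x xs _
          exact absurd ((pvOfList_eq_backslash b).mp hpe)
            (pvWild_not_backslash b hb)
        have hbs : String.ofList [a] = "\\" := by rw [(pvOfList_eq_backslash a).mpr ha]
        simp [pvLoopA, hpair, pvLoopB_cons, haw, hbs, hrec]
      · have hpair' : (a = '\\' && pvIsWild b) = false := by simpa using hpair
        by_cases hw : pvIsWild a = true
        · have hp : p ≠ "\\" := fun hpe => by simpa [hw] using H hpe a (b :: rest) rfl
          simp [pvLoopA, pvLoopB_cons, hpair', hw, hp]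
        · have hw' : pvIsWild a = false := by simpa using hw
          have hrec : pvLoopA (b :: rest) = pvLoopB (String.ofList [a]) (b :: rest) := by
            apply loopA_eq_loopB
            intro hpe x xs hx
            have ha : a = '\\' := (pvOfList_eq_backslash a).mp hpe
            have hbw : pvIsWild b = false := by
              subst ha; simpa using hpair'
            cases hx
            exact hbw
          simp [pvLoopA, pvLoopB_cons, hpair', hw', hrec]

-- ===== VERDICT (by name: the statement is the Claim_ definition above) =====
theorem contains_wildcard_spec : Claim_equal_contains_wildcard := by
  intro c _
  unfold Spec_contains_wildcard contains_wildcard contains_wildcard_alt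
  exact loopA_eq_loopB c.toList "" (by intro h; simp at h)
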